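-- pv_equiv track=rewrite | github.com/TerrenceHenry/constraint-scanner | src/constraint_scanner/simulation/fill_model.py | _ordered_flags
-- ===== SOURCE A (Python) =====
-- def _ordered_flags(flags: list[str]) -> list[str]:
--     order = (
--         "missing_book",
--         "timing_mismatch",
--         "stale_quote",
--         "shallow_miss",
--         "partial_fill",
--         "leg_asymmetry",
--         "non_executable_depth",
--     )
--     seen = set(flags)
--     return [flag for flag in order if flag in seen]
-- ===== SOURCE B (Python) =====
-- def _ordered_flags(flags: list[str]) -> list[str]:
--     order = (
--         "missing_book",
--         "timing_mismatch",
--         "stale_quote",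
--         "shallow_miss",
--         "partial_fill",
--         "leg_asymmetry",
--         "non_executable_depth",
--     )
--     rank = {f: i for i, f in enumerate(order)}
--     present = {f for f in flags if f in rank}
--     return sorted(present, key=rank.get)
-- ===== Notes on version B (the rewrite author's own statement) =====
-- stated objective: alternative
-- what changed: Instead of scanning the fixed canonical tuple and testing each entry against a set of the input, B precomputes a flag->position rank dict, collects the distinct known flags from the input, and sorts them by their precomputed rank.
import Mathlib
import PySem

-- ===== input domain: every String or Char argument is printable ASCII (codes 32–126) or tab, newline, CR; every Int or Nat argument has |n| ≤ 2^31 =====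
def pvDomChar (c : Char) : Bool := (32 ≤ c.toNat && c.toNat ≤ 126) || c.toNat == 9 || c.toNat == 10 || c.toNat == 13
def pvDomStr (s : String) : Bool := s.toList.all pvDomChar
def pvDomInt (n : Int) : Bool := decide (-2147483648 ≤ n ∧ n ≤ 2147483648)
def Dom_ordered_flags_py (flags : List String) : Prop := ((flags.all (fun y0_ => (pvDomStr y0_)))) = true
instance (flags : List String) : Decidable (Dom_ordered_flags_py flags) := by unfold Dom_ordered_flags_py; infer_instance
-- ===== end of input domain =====

-- B reorders the input flags by a precomputed rank instead of filtering the canonical tuple (alternative decomposition).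
-- ===== PORT A =====
def ordered_flags_py (flags : List String) : List String :=
  let order : List String := ["missing_book", "timing_mismatch", "stale_quote",
    "shallow_miss", "partial_fill", "leg_asymmetry", "non_executable_depth"]
  let seen : PySem.Set String := PySem.Set.ofList flags
  order.filter (fun flag => PySem.Set.contains seen flag)

-- ===== PORT B =====
def ordered_flags_py_alt (flags : List String) : List String :=
  let order : List String := ["missing_book", "timing_mismatch", "stale_quote",
    "shallow_miss", "partial_fill", "leg_asymmetry", "non_executable_depth"]
  let rank : PySem.Dict String Int :=
    (PySem.List.enumerate order).foldl (fun d p => d.insert p.2 p.1) PySem.Dict.empty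
  let present : PySem.Set String :=
    PySem.Set.ofList (flags.filter (fun f => PySem.Dict.contains rank f))
  PySem.List.sorted present (fun f => PySem.Dict.getD rank f 0) false

-- ===== PRECONDITION & SPEC =====
def Spec_ordered_flags_py (flags : List String) (out : List String) : Prop := out = ordered_flags_py_alt flags
instance (flags : List String) (out : List String) : Decidable (Spec_ordered_flags_py flags out) := by unfold Spec_ordered_flags_py; infer_instance

-- ===== CLAIM (what is proved, stated in full; the proofs are below) =====
def Claim_equal_ordered_flags_py : Prop := ∀ (flags : List String), Dom_ordered_flags_py flags → Spec_ordered_flags_py flags (ordered_flags_py flags)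

-- ===== LEMMAS AND PROOFS =====



-- abbreviations used only by the proofs
def pvOrder : List String := ["missing_book", "timing_mismatch", "stale_quote",
  "shallow_miss", "partial_fill", "leg_asymmetry", "non_executable_depth"]

def pvRank : PySem.Dict String Int :=
  (PySem.List.enumerate pvOrder).foldl (fun d p => d.insert p.2 p.1) PySem.Dict.empty

lemma pvRank_contains (f : String) : PySem.Dict.contains pvRank f = decide (f ∈ pvOrder) := by
  rw [PySem.Dict.contains_eq_decide_mem_keys]
  have h : pvRank.keys = pvOrder := by decide
  rw [h]

lemma pvA_eq (flags : List String) :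
    ordered_flags_py flags = pvOrder.filter (fun f => decide (f ∈ flags)) := by
  unfold ordered_flags_py
  refine List.filter_congr ?_
  intro f _
  simp [PySem.Set.contains]

lemma pvFilter_nodup (flags : List String) :
    (pvOrder.filter (fun f => decide (f ∈ flags))).Nodup :=
  List.Nodup.filter _ (by decide)

lemma pvPairwise (flags : List String) :
    (pvOrder.filter (fun f => decide (f ∈ flags))).Pairwise
      (fun a b => PySem.Dict.getD pvRank a 0 < PySem.Dict.getD pvRank b 0) := by
  have h : pvOrder.Pairwise (fun a b => PySem.Dict.getD pvRank a 0 < PySem.Dict.getD pvRank b 0) := by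
    decide
  exact h.sublist List.filter_sublist

lemma pvPerm (flags : List String) :
    (pvOrder.filter (fun f => decide (f ∈ flags))).Perm
      (PySem.Set.ofList (flags.filter (fun f => PySem.Dict.contains pvRank f))) := by
  refine (List.perm_ext_iff_of_nodup (pvFilter_nodup flags) (PySem.Set.nodup_ofList _)).mpr ?_
  intro f
  simp only [PySem.Set.mem_ofList, List.mem_filter, pvRank_contains]
  constructor
  · rintro ⟨ho, hf⟩; exact ⟨by simpa using hf, by simpa using ho⟩
  · rintro ⟨hf, ho⟩; exact ⟨by simpa using ho, by simpa using hf⟩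

-- ===== VERDICT (by name: the statement is the Claim_ definition above) =====
theorem ordered_flags_py_spec : Claim_equal_ordered_flags_py := by
  intro flags _
  unfold Spec_ordered_flags_py
  rw [pvA_eq]
  unfold ordered_flags_py_alt
  show pvOrder.filter _ = PySem.List.sorted
      (PySem.Set.ofList (flags.filter (fun f => PySem.Dict.contains pvRank f)))
      (fun f => PySem.Dict.getD pvRank f 0) false
  exact (PySem.List.sorted_eq_of_perm_of_pairwise_lt _ _ _ (pvPerm flags) (pvPairwise flags)).symm
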